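-- pv_equiv track=rewrite | github.com/ilanpogr/MIPAS | main.py | get_num_of_susp_stores
-- ===== SOURCE A (Python) =====
-- def get_num_of_susp_stores(lines):
--     num_of_susp_stores = set()
--     first_line = True
--     for line in lines:
--         if first_line:
--             first_line = False
--             continue
--         num_of_susp_stores.add(line.split(",")[2].split('/')[-1])
--     return str(len(num_of_susp_stores))
-- ===== SOURCE B (Python) =====
-- def get_num_of_susp_stores(lines):
--     # Collect the store id of every non-header line, then sort and count
--     # distinct ids in one linear scan (sort-then-scan instead of a hash set).
--     keys = []
--     for i, line in enumerate(lines):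
--         if i == 0:
--             continue
--         keys.append(line.split(",")[2].split('/')[-1])
--     keys.sort()
--     count = 0
--     prev = None
--     for k in keys:
--         if prev is None or k != prev:
--             count += 1
--         prev = k
--     return str(count)
-- ===== Notes on version B (the rewrite author's own statement) =====
-- stated objective: alternative
-- what changed: Replaces A's hash-set accumulation with a collect-keys / sort / single linear scan that counts an id as new when it differs from its sorted predecessor.
import Mathlib
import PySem

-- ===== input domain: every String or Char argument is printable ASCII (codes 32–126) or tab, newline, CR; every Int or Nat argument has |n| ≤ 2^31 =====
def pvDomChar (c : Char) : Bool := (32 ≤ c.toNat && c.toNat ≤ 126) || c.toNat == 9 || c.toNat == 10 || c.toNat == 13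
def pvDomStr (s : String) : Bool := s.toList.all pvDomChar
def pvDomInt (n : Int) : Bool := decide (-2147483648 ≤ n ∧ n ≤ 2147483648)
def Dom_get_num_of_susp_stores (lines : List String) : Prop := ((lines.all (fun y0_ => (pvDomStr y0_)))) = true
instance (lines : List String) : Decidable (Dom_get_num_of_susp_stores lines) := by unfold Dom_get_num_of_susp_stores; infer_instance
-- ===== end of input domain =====

-- B replaces A's hash-set accumulation by collect-keys / sort / one linear scan counting
-- distinct adjacent values (objective: alternative decomposition, no speed claim).

-- shared key extraction: line.split(",")[2].split('/')[-1]
-- (both Pythons contain this same expression; the [2] raises IndexError on short lines — excluded by Pre_)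
def pvKey (line : String) : String :=
  let parts := (PySem.Str.split? line ",").getD []
  let f := (PySem.List.pyGet? parts 2).getD ""
  (PySem.List.pyGet? ((PySem.Str.split? f "/").getD []) (-1)).getD ""

-- ===== PORT A =====
def get_num_of_susp_stores (lines : List String) : String :=
  let st := lines.foldl
    (fun (st : PySem.Set String × Bool) line =>
      if st.2 then (st.1, false)
      else (PySem.Set.add st.1 (pvKey line), false))
    (PySem.Set.empty, true)
  PySem.Int.toStr (PySem.Set.len st.1)

-- ===== PORT B =====
def get_num_of_susp_stores_alt (lines : List String) : String :=
  let keys := (PySem.List.enumerate lines).foldl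
    (fun (acc : List String) p => if p.1 = 0 then acc else acc ++ [pvKey p.2]) []
  let ks := PySem.List.sorted keys (fun x => x)
  let fin := ks.foldl
    (fun (st : Int × Option String) k =>
      (if st.2 = none ∨ st.2 ≠ some k then st.1 + 1 else st.1, some k))
    (0, none)
  PySem.Int.toStr fin.1

-- ===== PRECONDITION & SPEC =====
-- Pre_ excludes exactly the inputs where the Python raises IndexError: a non-header
-- line with fewer than three comma-separated fields (both A and B raise there).
def Pre_get_num_of_susp_stores (lines : List String) : Prop :=
  ∀ line ∈ lines.drop 1, 3 ≤ ((PySem.Str.split? line ",").getD []).length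
instance (lines : List String) : Decidable (Pre_get_num_of_susp_stores lines) := by
  unfold Pre_get_num_of_susp_stores; infer_instance

def pvWitness_get_num_of_susp_stores : List String :=
  ["store_id,ts,url", "1,2,a/b/s1", "3,4,s2", "5,6,a/b/s1"]

def Spec_get_num_of_susp_stores (lines : List String) (out : String) : Prop := out = get_num_of_susp_stores_alt lines
instance (lines : List String) (out : String) : Decidable (Spec_get_num_of_susp_stores lines out) := by unfold Spec_get_num_of_susp_stores; infer_instance

-- ===== CLAIM (what is proved, stated in full; the proofs are below) =====
def Claim_equal_get_num_of_susp_stores : Prop := ∀ (lines : List String), Dom_get_num_of_susp_stores lines → Pre_get_num_of_susp_stores lines → Spec_get_num_of_susp_stores lines (get_num_of_susp_stores lines)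

-- ===== LEMMAS AND PROOFS =====

-- A's loop after the header line: the flag stays false, so it is a plain Set.add fold.
theorem pvFoldA_flag_false (ls : List String) (s : PySem.Set String) :
    ls.foldl
      (fun (st : PySem.Set String × Bool) line =>
        if st.2 then (st.1, false)
        else (PySem.Set.add st.1 (pvKey line), false)) (s, false)
      = (ls.foldl (fun s line => PySem.Set.add s (pvKey line)) s, false) := by
  induction ls generalizing s with
  | nil => rfl
  | cons x t ih => simpa using ih (PySem.Set.add s (pvKey x))

-- B's collection loop gathers exactly the keys of the non-header lines.
theorem pvKeysB (x : String) (rest : List String) :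
    (PySem.List.enumerate (x :: rest)).foldl
        (fun (acc : List String) p => if p.1 = 0 then acc else acc ++ [pvKey p.2]) []
      = rest.map pvKey := by
  rw [PySem.List.enumerate_cons, List.foldl_cons, if_pos rfl]
  rw [PySem.List.foldl_congr_mem _ _
      (fun (acc : List String) (p : Int × String) => acc ++ [pvKey p.2]) []
      (by
        intro acc p hp
        rcases (PySem.List.mem_enumerate_iff rest 1 p).1 hp with ⟨k, hk, rfl⟩
        simp only
        rw [if_neg (by omega)])]
  rw [PySem.List.foldl_append_singleton_eq_map (fun p : Int × String => pvKey p.2)]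
  conv_rhs => rw [← PySem.List.map_snd_enumerate rest 1]
  rw [List.map_map]
  rfl

-- The sorted-scan, started after an element p bounding the rest below, counts the
-- distinct elements other than p.
theorem pvScan_some (l : List String) (hsorted : l.Pairwise (· ≤ ·))
    (p : String) (hlb : ∀ y ∈ l, p ≤ y) (c : Int) :
    (l.foldl
      (fun (st : Int × Option String) k =>
        (if st.2 = none ∨ st.2 ≠ some k then st.1 + 1 else st.1, some k))
      (c, some p)).1 = c + ((l.toFinset.erase p).card : Int) := by
  induction l generalizing p c with
  | nil => simp
  | cons a t ih =>
    have hpa : p ≤ a := hlb a (by simp)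
    have hst : t.Pairwise (· ≤ ·) := hsorted.of_cons
    have hat : ∀ y ∈ t, a ≤ y := fun y hy => (List.pairwise_cons.1 hsorted).1 y hy
    by_cases hap : a = p
    · subst hap
      rw [List.foldl_cons, if_neg (by simp)]
      rw [ih hst a hat c]
      simp [Finset.erase_insert_eq_erase]
    · rw [List.foldl_cons, if_pos (Or.inr (fun h => hap (Option.some.inj h).symm))]
      rw [ih hst a hat (c + 1)]
      have hpt : p ∉ t := by
        intro hpm
        have := hat p hpm
        have : p = a := le_antisymm hpa this
        exact hap this.symm
      have hpins : p ∉ insert a t.toFinset := by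
        simp only [Finset.mem_insert, List.mem_toFinset]
        rintro (h | h)
        · exact hap h.symm
        · exact hpt h
      rw [List.toFinset_cons, Finset.erase_eq_of_notMem hpins]
      have hcard : (insert a t.toFinset).card = (t.toFinset.erase a).card + 1 := by
        rw [← Finset.insert_erase (Finset.mem_insert_self a t.toFinset),
          Finset.erase_insert_eq_erase,
          Finset.card_insert_of_notMem (Finset.notMem_erase a _)]
      rw [hcard]
      push_cast
      ring

-- Scan from the initial (0, none) state: the count is the number of distinct elements.
theorem pvScan_none (l : List String) (hsorted : l.Pairwise (· ≤ ·)) :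
    (l.foldl
      (fun (st : Int × Option String) k =>
        (if st.2 = none ∨ st.2 ≠ some k then st.1 + 1 else st.1, some k))
      (0, none)).1 = (l.toFinset.card : Int) := by
  cases l with
  | nil => simp
  | cons a t =>
    rw [List.foldl_cons, if_pos (Or.inl rfl)]
    rw [pvScan_some t hsorted.of_cons a
      (fun y hy => (List.pairwise_cons.1 hsorted).1 y hy) (((0 : Int), (none : Option String)).1 + 1)]
    rw [List.toFinset_cons]
    have hcard : (insert a t.toFinset).card = (t.toFinset.erase a).card + 1 := by
      rw [← Finset.insert_erase (Finset.mem_insert_self a t.toFinset),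
        Finset.erase_insert_eq_erase,
        Finset.card_insert_of_notMem (Finset.notMem_erase a _)]
    rw [hcard]; push_cast; ring

-- The distinct-first-occurrence list has as many elements as the Finset of members.
theorem pvSetLen (ks : List String) :
    ((PySem.Set.ofList ks).length : Int) = (ks.toFinset.card : Int) := by
  have nd : (PySem.Set.ofList ks).Nodup := PySem.Set.nodup_ofList ks
  rw [← List.toFinset_card_of_nodup nd]
  congr 2
  ext x
  simp [PySem.Set.mem_ofList]

-- ===== VERDICT (by name: the statement is the Claim_ definition above) =====
theorem get_num_of_susp_stores_spec : Claim_equal_get_num_of_susp_stores := by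
  intro lines _ _
  unfold Spec_get_num_of_susp_stores get_num_of_susp_stores get_num_of_susp_stores_alt
  cases lines with
  | nil => rfl
  | cons x rest =>
    have hA : List.foldl (fun s line => PySem.Set.add s (pvKey line)) PySem.Set.empty rest
        = PySem.Set.ofList (rest.map pvKey) := by
      rw [← PySem.Set.update_map_eq_foldl_add rest pvKey PySem.Set.empty]
      exact PySem.Set.update_nil_left _
    rw [pvKeysB, List.foldl_cons, if_pos rfl, pvFoldA_flag_false, hA]
    show PySem.Int.toStr ((PySem.Set.ofList (rest.map pvKey)).length : Int)
      = PySem.Int.toStr (List.foldl (fun (st : Int × Option String) k =>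
          (if st.2 = none ∨ st.2 ≠ some k then st.1 + 1 else st.1, some k)) (0, none)
          (PySem.List.sorted (rest.map pvKey) (fun x => x))).1
    rw [pvSetLen, pvScan_none _ (PySem.List.sorted_pairwise (rest.map pvKey) (fun x => x))]
    congr 2
    exact (congrArg Finset.card
      (List.toFinset_eq_of_perm _ _ (PySem.List.sorted_perm (rest.map pvKey) (fun x => x) false))).symm
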